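-- pv_equiv track=rewrite | github.com/google-deepmind/dm_robotics | py/manipulation/props/parametric_object/rgb_objects/rgb_object_names.py | parameters_equispaced_combinations
-- ===== SOURCE A (Python) =====
-- import collections
-- import itertools
-- from typing import Dict, Tuple
--
-- def parameters_equispaced_combinations(
--     params_dict_collection: collections.OrderedDict,
--     coefficients: Tuple[int, ...]) -> collections.OrderedDict:
--   """Function to create equispaced combinations.
--
--   This function can be used to create equispaced distributed combinations of
--   parametersDict. The function takes as input a collection of alphabetically
--   tagged parameterDicts (e.g. a, .. z). The function combines the given
--   parametersDicts to create new parametersDicts constructed as a*ca + ..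
--   + z*cz with ca + .. + cz = 1. The number of generated parametersDicts is
--   controlled by fixing the valid values for the coefficients cn. The resulting
--   objects are named aca_..._zcz.
--
--   Args:
--     params_dict_collection: a collection of parametersDict.
--     coefficients: the valid coefficients (tuple of int) expressed as integer
--       percentage, (0, 25, 50, 75, 100) corresponds to (0, 0.25, 0.5, 0.75, 1).
--   Returns:
--     the collection of combinations
--   """
--
--   result_dictionary = collections.OrderedDict({})
--   n = len(params_dict_collection)
--
--   # Creating valid combinations
--   valid_combinations = [
--       s for s in itertools.product(coefficients, repeat=n) if sum(s) == 100
--   ]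
--
--   # Creating convex combinations of objects
--   result_dictionary = collections.OrderedDict({})
--   for valid_combination in valid_combinations:
--     obj_nickname = ""
--     obj_values = None
--     p = params_dict_collection
--     for kn, vn, cn in zip(p.keys(), p.values(), valid_combination):
--       if obj_values is None:
--         obj_values = vn * cn
--         if cn != 0:
--           obj_nickname = str(coefficients.index(cn)) + kn  # pytype: disable=attribute-error
--       else:
--         obj_values = obj_values + vn * cn
--         if cn != 0:
--           obj_nickname = obj_nickname + str(coefficients.index(cn)) + kn
--     result_dictionary.update({obj_nickname: obj_values//100})
--   return result_dictionary
-- ===== SOURCE B (Python) =====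
-- import collections
--
--
-- def parameters_equispaced_combinations(params_dict_collection, coefficients):
--   """DFS over positions with sum-bound pruning; coefficient->first-index dict
--   precomputed once (instead of materialising the full product and rescanning)."""
--   items = list(params_dict_collection.items())
--   n = len(items)
--   first_index = {}
--   for i, c in enumerate(coefficients):
--     if c not in first_index:
--       first_index[c] = i
--   lo = min(coefficients) if coefficients else 0
--   hi = max(coefficients) if coefficients else 0
--   result = collections.OrderedDict()
--
--   def dfs(i, s, nick, val):
--     r = n - i
--     if s + r * lo > 100 or s + r * hi < 100:
--       return
--     if i == n:
--       result[nick] = val // 100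
--       return
--     k, v = items[i]
--     for c in coefficients:
--       dfs(i + 1, s + c,
--           nick + (str(first_index[c]) + k if c != 0 else ""),
--           val + v * c)
--
--   dfs(0, 0, "", 0)
--   return result
-- ===== Notes on version B (the rewrite author's own statement) =====
-- stated objective: alternative
-- what changed: Replaces A's materialise-the-whole-|C|^n-product-then-filter-by-sum-then-rescan-coefficients-with-.index-per-entry by a recursive DFS over the dict items that carries the partial sum, nickname and value, prunes branches whose remaining min/max coefficient bounds cannot reach 100, and looks indices up in a coefficient->first-index dict built once.
import Mathlib
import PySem

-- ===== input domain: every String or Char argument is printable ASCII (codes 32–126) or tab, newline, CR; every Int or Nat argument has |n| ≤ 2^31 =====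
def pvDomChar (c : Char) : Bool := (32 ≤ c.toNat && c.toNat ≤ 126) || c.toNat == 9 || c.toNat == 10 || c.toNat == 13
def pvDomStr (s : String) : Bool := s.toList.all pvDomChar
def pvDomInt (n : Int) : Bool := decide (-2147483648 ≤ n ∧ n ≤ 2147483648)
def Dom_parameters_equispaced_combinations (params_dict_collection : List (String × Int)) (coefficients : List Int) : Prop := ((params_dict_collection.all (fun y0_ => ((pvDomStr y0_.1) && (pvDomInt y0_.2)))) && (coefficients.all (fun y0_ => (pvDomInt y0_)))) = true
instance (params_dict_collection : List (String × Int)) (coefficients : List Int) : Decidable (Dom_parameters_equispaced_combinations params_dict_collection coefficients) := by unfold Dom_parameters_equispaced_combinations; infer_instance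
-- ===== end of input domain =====

-- B replaces A's "materialise the whole |C|^n product, filter by sum, rescan coefficients
-- with .index per entry" by a recursive DFS over the positions with sum-bound pruning, an
-- incremental nickname/value accumulator and a coefficient->first-index dict built once
-- (objective: alternative; exact same returned dict).

-- ===== PORT A =====

-- itertools.product(coefficients, repeat=n), in itertools order
def pvProd (cs : List Int) : Nat → List (List Int)
  | 0 => [[]]
  | n + 1 => cs.flatMap (fun c => (pvProd cs n).map (c :: ·))

-- the body of A's inner 'for kn, vn, cn in zip(...)' loop; state = (obj_nickname, obj_values)
def pvAStep (cs : List Int) (acc : String × Option Int) (kvc : (String × Int) × Int) : String × Option Int :=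
  match acc.2 with
  | none =>
      (if kvc.2 ≠ 0 then PySem.Int.toStr (((PySem.List.index? cs kvc.2).getD 0 : Nat) : Int) ++ kvc.1.1 else acc.1,
       some (kvc.1.2 * kvc.2))
  | some ov =>
      (if kvc.2 ≠ 0 then acc.1 ++ PySem.Int.toStr (((PySem.List.index? cs kvc.2).getD 0 : Nat) : Int) ++ kvc.1.1 else acc.1,
       some (ov + kvc.1.2 * kvc.2))

def parameters_equispaced_combinations (params_dict_collection : List (String × Int)) (coefficients : List Int) : List (String × Int) :=
  -- params_dict_collection is a Python dict: normalise duplicate keys as dict() does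
  let p := PySem.Dict.ofList params_dict_collection
  let n := p.items.length
  let valid_combinations := (pvProd coefficients n).filter (fun s => s.sum == 100)
  let result_dictionary := valid_combinations.foldl
    (fun d valid_combination =>
      let st := (p.items.zip valid_combination).foldl (pvAStep coefficients) ("", none)
      -- obj_values is never None when the loop body ran; .getD 0 is unreachable otherwise
      d.insert st.1 (PySem.Int.floordiv (st.2.getD 0) 100))
    PySem.Dict.empty
  result_dictionary.items

-- ===== PORT B =====

-- first_index: coefficient -> index of its first occurrence (built once)
def pvFirstIndex (cs : List Int) : PySem.Dict Int Int :=
  (PySem.List.enumerate cs).foldl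
    (fun d ic => if d.contains ic.2 then d else d.insert ic.2 ic.1) PySem.Dict.empty

-- the recursive dfs of Source B: remaining items, partial sum, nickname and value so far
def pvDfs (cs : List Int) (fi : PySem.Dict Int Int) (lo hi : Int) :
    List (String × Int) → Int → String → Int → PySem.Dict String Int → PySem.Dict String Int
  | rest, s, nick, val, d =>
    if s + (rest.length : Int) * lo > 100 ∨ s + (rest.length : Int) * hi < 100 then d
    else
      match rest with
      | [] => d.insert nick (PySem.Int.floordiv val 100)
      | (k, v) :: tl =>
          cs.foldl (fun d' c =>
            pvDfs cs fi lo hi tl (s + c)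
              (nick ++ (if c ≠ 0 then PySem.Int.toStr (fi.getD c 0) ++ k else ""))
              (val + v * c) d') d

def parameters_equispaced_combinations_alt (params_dict_collection : List (String × Int)) (coefficients : List Int) : List (String × Int) :=
  let items := (PySem.Dict.ofList params_dict_collection).items
  let fi := pvFirstIndex coefficients
  let lo := if coefficients = [] then 0 else (PySem.List.min? coefficients (fun x => x)).getD 0
  let hi := if coefficients = [] then 0 else (PySem.List.max? coefficients (fun x => x)).getD 0
  (pvDfs coefficients fi lo hi items 0 "" 0 PySem.Dict.empty).items

-- ===== PRECONDITION & SPEC =====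
def Spec_parameters_equispaced_combinations (params_dict_collection : List (String × Int)) (coefficients : List Int) (out : List (String × Int)) : Prop := out = parameters_equispaced_combinations_alt params_dict_collection coefficients
instance (params_dict_collection : List (String × Int)) (coefficients : List Int) (out : List (String × Int)) : Decidable (Spec_parameters_equispaced_combinations params_dict_collection coefficients out) := by unfold Spec_parameters_equispaced_combinations; infer_instance

-- ===== CLAIM (what is proved, stated in full; the proofs are below) =====
def Claim_equal_parameters_equispaced_combinations : Prop := ∀ (params_dict_collection : List (String × Int)) (coefficients : List Int), Dom_parameters_equispaced_combinations params_dict_collection coefficients → Spec_parameters_equispaced_combinations params_dict_collection coefficients (parameters_equispaced_combinations params_dict_collection coefficients)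

-- ===== LEMMAS AND PROOFS =====

-- proof-side: the nickname extension and value contributed by combination t over items
def pvNickExt (fi : PySem.Dict Int Int) : List (String × Int) → List Int → String
  | (k, _) :: tl, c :: ct =>
      (if c ≠ 0 then PySem.Int.toStr (fi.getD c 0) ++ k else "") ++ pvNickExt fi tl ct
  | _, _ => ""

def pvValExt : List (String × Int) → List Int → Int
  | (_, v) :: tl, c :: ct => v * c + pvValExt tl ct
  | _, _ => 0

-- elements of pvProd cs n have length n, entries drawn from cs, and sum within [n*lo, n*hi]
theorem pvProd_length (cs : List Int) : ∀ (n : Nat) (t : List Int), t ∈ pvProd cs n → t.length = n := by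
  intro n
  induction n with
  | zero => intro t ht; simp [pvProd] at ht; simp [ht]
  | succ n ih =>
    intro t ht
    simp [pvProd] at ht
    obtain ⟨c, hc, t', ht', rfl⟩ := ht
    simp [ih t' ht']

theorem pvProd_mem (cs : List Int) : ∀ (n : Nat) (t : List Int), t ∈ pvProd cs n → ∀ c ∈ t, c ∈ cs := by
  intro n
  induction n with
  | zero => intro t ht; simp [pvProd] at ht; simp [ht]
  | succ n ih =>
    intro t ht
    simp [pvProd] at ht
    obtain ⟨c, hc, t', ht', rfl⟩ := ht
    intro x hx
    rcases List.mem_cons.mp hx with h | h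
    · exact h ▸ hc
    · exact ih t' ht' x h

theorem pvProd_sum_bounds (cs : List Int) (lo hi : Int)
    (hlo : ∀ c ∈ cs, lo ≤ c) (hhi : ∀ c ∈ cs, c ≤ hi) :
    ∀ (n : Nat) (t : List Int), t ∈ pvProd cs n →
      (n : Int) * lo ≤ t.sum ∧ t.sum ≤ (n : Int) * hi := by
  intro n
  induction n with
  | zero => intro t ht; simp [pvProd] at ht; simp [ht]
  | succ n ih =>
    intro t ht
    simp [pvProd] at ht
    obtain ⟨c, hc, t', ht', rfl⟩ := ht
    obtain ⟨h1, h2⟩ := ih t' ht'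
    have := hlo c hc
    have := hhi c hc
    simp only [List.sum_cons]
    constructor
    · push_cast; nlinarith
    · push_cast; nlinarith

-- the first_index dict looked up is exactly tuple.index
theorem pvFI_get? :
    ∀ (cs : List Int) (k : Int) (d : PySem.Dict Int Int) (c : Int),
      ((PySem.List.enumerate cs k).foldl
          (fun d ic => if d.contains ic.2 then d else d.insert ic.2 ic.1) d).get? c =
        if d.contains c then d.get? c
        else (PySem.List.index? cs c).map (fun i => k + (i : Int)) := by
  intro cs
  induction cs with
  | nil =>
    intro k d c
    simp [PySem.List.enumerate]
    intro h
    rw [PySem.Dict.contains_eq_isSome_get?] at h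
    simp at h
    exact h
  | cons x tl ih =>
    intro k d c
    have hen : PySem.List.enumerate (x :: tl) k = (k, x) :: PySem.List.enumerate tl (k + 1) := by
      simp [PySem.List.enumerate]
    rw [hen]
    simp only [List.foldl_cons]
    rw [ih]
    cases hdx : d.contains x with
    | true =>
      simp only [if_true]
      by_cases hx : x = c
      · subst hx
        rw [PySem.List.index?_cons_self]
        simp [hdx]
      · rw [PySem.List.index?_cons_of_ne _ hx]
        cases hd : d.contains c with
        | true => simp
        | false =>
          simp only [Bool.false_eq_true, if_false]
          cases PySem.List.index? tl c <;> simp; ring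
    | false =>
      simp only [Bool.false_eq_true, if_false]
      by_cases hx : x = c
      · subst hx
        rw [PySem.List.index?_cons_self]
        have h1 : (d.insert x k).contains x = true := by
          rw [PySem.Dict.contains_eq_isSome_get?, PySem.Dict.get?_insert_self]; rfl
        simp [hdx, h1, PySem.Dict.get?_insert_self]
      · rw [PySem.List.index?_cons_of_ne _ hx]
        have h1 : (d.insert x k).contains c = d.contains c := by
          rw [PySem.Dict.contains_eq_isSome_get?, PySem.Dict.contains_eq_isSome_get?,
            PySem.Dict.get?_insert_of_ne _ _ (fun h => hx h.symm)]
        rw [h1]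
        cases hd : d.contains c with
        | true =>
          simp only [if_true]
          exact PySem.Dict.get?_insert_of_ne _ _ (fun h => hx h.symm)
        | false =>
          simp only [Bool.false_eq_true, if_false]
          cases PySem.List.index? tl c <;> simp; ring

theorem pvFirstIndex_getD (cs : List Int) (c : Int) (hc : c ∈ cs) :
    (pvFirstIndex cs).getD c 0 = (((PySem.List.index? cs c).getD 0 : Nat) : Int) := by
  have h0 : (PySem.Dict.empty : PySem.Dict Int Int).contains c = false := by
    rw [PySem.Dict.contains_eq_isSome_get?]; rfl
  rw [PySem.Dict.getD_eq_get?_getD, pvFirstIndex, pvFI_get?, h0]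
  obtain ⟨i, hi⟩ := Option.isSome_iff_exists.mp ((PySem.List.index?_isSome_iff cs c).mpr hc)
  rw [hi]
  rw [PySem.List.index?_eq_idxOf?] at hi
  simp

-- the bounds B computes really bound every coefficient
theorem pv_min?_some (cs : List Int) (hne : cs ≠ []) :
    ∃ m, PySem.List.min? cs (fun x => x) = some m ∧ ∀ c ∈ cs, m ≤ c := by
  cases hm : PySem.List.min? cs (fun x => x) with
  | none => exact absurd ((PySem.List.min?_eq_none_iff cs _).mp hm) hne
  | some m => exact ⟨m, rfl, PySem.List.min?_isMin hm⟩

theorem pv_max?_some (cs : List Int) (hne : cs ≠ []) :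
    ∃ m, PySem.List.max? cs (fun x => x) = some m ∧ ∀ c ∈ cs, c ≤ m := by
  cases hm : PySem.List.max? cs (fun x => x) with
  | none => exact absurd ((PySem.List.max?_eq_none_iff cs _).mp hm) hne
  | some m => exact ⟨m, rfl, PySem.List.max?_isMax hm⟩

theorem pv_lo_le (cs : List Int) (c : Int) (hc : c ∈ cs) :
    (if cs = [] then 0 else (PySem.List.min? cs (fun x => x)).getD 0) ≤ c := by
  have hne : cs ≠ [] := List.ne_nil_of_mem hc
  obtain ⟨m, hm, hmin⟩ := pv_min?_some cs hne
  simp [hne, hm]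
  exact hmin c hc

theorem pv_hi_ge (cs : List Int) (c : Int) (hc : c ∈ cs) :
    c ≤ (if cs = [] then 0 else (PySem.List.max? cs (fun x => x)).getD 0) := by
  have hne : cs ≠ [] := List.ne_nil_of_mem hc
  obtain ⟨m, hm, hmax⟩ := pv_max?_some cs hne
  simp [hne, hm]
  exact hmax c hc

-- A's inner zip-loop, once obj_values is set, accumulates pvNickExt/pvValExt
theorem pvAfold (cs : List Int) :
    ∀ (tl : List (String × Int)) (ct : List Int), (∀ c ∈ ct, c ∈ cs) →
      ∀ (nick : String) (acc : Int),
        ((tl.zip ct).foldl (pvAStep cs) (nick, some acc)) =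
          (nick ++ pvNickExt (pvFirstIndex cs) tl ct, some (acc + pvValExt tl ct)) := by
  intro tl
  induction tl with
  | nil =>
    intro ct hct nick acc
    simp [pvNickExt, pvValExt]
  | cons kv tl ih =>
    intro ct hct nick acc
    cases ct with
    | nil => simp [pvNickExt, pvValExt]
    | cons c ct =>
      obtain ⟨k, v⟩ := kv
      have hc : c ∈ cs := hct c List.mem_cons_self
      have hct' : ∀ x ∈ ct, x ∈ cs := fun x hx => hct x (List.mem_cons_of_mem _ hx)
      simp only [List.zip_cons_cons, List.foldl_cons]
      have hstep : pvAStep cs (nick, some acc) ((k, v), c) =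
          ((if c ≠ 0 then nick ++ PySem.Int.toStr ((pvFirstIndex cs).getD c 0) ++ k else nick),
           some (acc + v * c)) := by
        simp only [pvAStep]
        by_cases h0 : c = 0
        · simp [h0]
        · simp only [h0, ne_eq, not_false_iff, if_true, Prod.mk.injEq]
          rw [pvFirstIndex_getD cs c hc]
          exact ⟨rfl, trivial⟩
      rw [hstep, ih ct hct']
      simp only [pvNickExt, pvValExt, Prod.mk.injEq]
      constructor
      · by_cases h0 : c = 0
        · simp [h0]
        · simp [h0, String.append_assoc]
      · ring_nf

theorem pvDfs_spec (cs : List Int) (fi : PySem.Dict Int Int) (lo hi : Int)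
    (hlo : ∀ c ∈ cs, lo ≤ c) (hhi : ∀ c ∈ cs, c ≤ hi) :
    ∀ (rest : List (String × Int)) (s : Int) (nick : String) (val : Int)
      (d : PySem.Dict String Int),
    pvDfs cs fi lo hi rest s nick val d =
      ((pvProd cs rest.length).filter (fun t => (s + t.sum) == 100)).foldl
        (fun d' t => d'.insert (nick ++ pvNickExt fi rest t)
          (PySem.Int.floordiv (val + pvValExt rest t) 100)) d := by
  intro rest
  induction rest with
  | nil =>
    intro s nick val d
    rw [pvDfs]
    simp only [List.length_nil, Nat.cast_zero, zero_mul, add_zero]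
    by_cases hs : s = 100
    · subst hs
      simp [pvProd, pvNickExt, pvValExt]
    · rw [if_pos (by omega)]
      have hempty : ((pvProd cs 0).filter (fun t => (s + t.sum) == 100)) = [] := by
        simp [pvProd]; omega
      rw [hempty]
      rfl
  | cons kv tl ih =>
    intro s nick val d
    obtain ⟨k, v⟩ := kv
    rw [pvDfs]
    by_cases hprune : s + ((k, v) :: tl).length * lo > 100 ∨ s + ((k, v) :: tl).length * hi < 100
    · rw [if_pos hprune]
      have hempty : ((pvProd cs ((k, v) :: tl).length).filter
          (fun t => (s + t.sum) == 100)) = [] := by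
        rw [List.filter_eq_nil_iff]
        intro t ht
        obtain ⟨h1, h2⟩ := pvProd_sum_bounds cs lo hi hlo hhi _ t ht
        simp only [List.length_cons] at hprune h1 h2 ⊢
        simp
        omega
      rw [hempty]
      rfl
    · rw [if_neg hprune]
      show cs.foldl _ d = _
      rw [show pvProd cs (((k, v) :: tl).length) = cs.flatMap (fun c => (pvProd cs tl.length).map (c :: ·)) from rfl]
      rw [List.filter_flatMap, List.foldl_flatMap]
      apply PySem.List.foldl_congr_mem
      intro acc c _
      rw [ih, List.filter_map, List.foldl_map]
      have hfil : ((pvProd cs tl.length).filter ((fun t => (s + t.sum) == 100) ∘ (c :: ·)))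
          = ((pvProd cs tl.length).filter (fun t => ((s + c) + t.sum) == 100)) := by
        apply List.filter_congr
        intro t _
        simp only [Function.comp_apply, List.sum_cons]
        congr 1
        omega
      rw [hfil]
      apply PySem.List.foldl_congr_mem
      intro acc' t _
      congr 1
      · simp only [pvNickExt, String.append_assoc]
      · congr 1
        simp only [pvValExt]
        ring

-- ===== VERDICT (by name: the statement is the Claim_ definition above) =====
theorem parameters_equispaced_combinations_spec : Claim_equal_parameters_equispaced_combinations := by
  intro pdc cs _
  unfold Spec_parameters_equispaced_combinations
  simp only [parameters_equispaced_combinations, parameters_equispaced_combinations_alt]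
  rw [pvDfs_spec cs (pvFirstIndex cs) _ _ (fun c hc => pv_lo_le cs c hc)
      (fun c hc => pv_hi_ge cs c hc)]
  generalize (PySem.Dict.ofList pdc).items = items
  apply congrArg PySem.Dict.items
  have hfil : ((pvProd cs items.length).filter (fun t => ((0 : Int) + t.sum) == 100))
      = ((pvProd cs items.length).filter (fun t => t.sum == 100)) := by
    apply List.filter_congr
    intro t _
    rw [zero_add]
  rw [hfil]
  apply PySem.List.foldl_congr_mem
  intro acc t ht
  have hmem := (List.mem_filter.mp ht).1
  have hsum := (List.mem_filter.mp ht).2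
  have hlen := pvProd_length cs _ t hmem
  have hcs := pvProd_mem cs _ t hmem
  cases items with
  | nil =>
    simp [pvProd] at hmem
    subst hmem
    simp at hsum
  | cons kv itl =>
    obtain ⟨k, v⟩ := kv
    cases t with
    | nil => simp at hlen
    | cons c ct =>
      have hc : c ∈ cs := hcs c List.mem_cons_self
      have hct : ∀ x ∈ ct, x ∈ cs := fun x hx => hcs x (List.mem_cons_of_mem _ hx)
      simp only [List.zip_cons_cons, List.foldl_cons]
      have hstep : pvAStep cs ("", none) ((k, v), c) =
          ((if c ≠ 0 then PySem.Int.toStr ((pvFirstIndex cs).getD c 0) ++ k else ""),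
           some (v * c)) := by
        simp only [pvAStep]
        by_cases h0 : c = 0
        · simp [h0]
        · simp [h0, pvFirstIndex_getD cs c hc]
      rw [hstep, pvAfold cs itl ct hct]
      dsimp only
      congr 1
      simp [pvValExt]
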